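-- pv_equiv track=rewrite | github.com/RedPillCoder/SafeSites | VerifyNet/VerifyNet.py | score_security_headers
-- ===== SOURCE A (Python) =====
-- from typing import Dict, List, Optional, Tuple
--
-- def score_security_headers(headers: Dict[str, str]) -> Dict[str, bool]:
--     lower = {k.lower(): v for k, v in headers.items()}
--     return {
--         "csp": "content-security-policy" in lower,
--         "x_content_type_options": lower.get("x-content-type-options", "").lower() == "nosniff",
--         "x_frame_options": "x-frame-options" in lower,
--         "referrer_policy": "referrer-policy" in lower,
--         "permissions_policy": "permissions-policy" in lower or "feature-policy" in lower,
--         "hsts": "strict-transport-security" in lower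
--     }
-- ===== SOURCE B (Python) =====
-- def score_security_headers(headers):
--     result = {
--         "csp": False,
--         "x_content_type_options": False,
--         "x_frame_options": False,
--         "referrer_policy": False,
--         "permissions_policy": False,
--         "hsts": False,
--     }
--     for k, v in headers.items():
--         lk = k.lower()
--         if lk == "content-security-policy":
--             result["csp"] = True
--         elif lk == "x-content-type-options":
--             result["x_content_type_options"] = v.lower() == "nosniff"
--         elif lk == "x-frame-options":
--             result["x_frame_options"] = True
--         elif lk == "referrer-policy":
--             result["referrer_policy"] = True
--         elif lk == "permissions-policy" or lk == "feature-policy":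
--             result["permissions_policy"] = True
--         elif lk == "strict-transport-security":
--             result["hsts"] = True
--     return result
-- ===== Notes on version B (the rewrite author's own statement) =====
-- stated objective: alternative
-- what changed: B drops A's intermediate lowercased dict entirely: it initializes the six flags to False and sets them directly in a single pass over headers.items(), overwriting the nosniff flag on each match so the last matching value wins exactly as A's dict comprehension does.
import Mathlib
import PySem

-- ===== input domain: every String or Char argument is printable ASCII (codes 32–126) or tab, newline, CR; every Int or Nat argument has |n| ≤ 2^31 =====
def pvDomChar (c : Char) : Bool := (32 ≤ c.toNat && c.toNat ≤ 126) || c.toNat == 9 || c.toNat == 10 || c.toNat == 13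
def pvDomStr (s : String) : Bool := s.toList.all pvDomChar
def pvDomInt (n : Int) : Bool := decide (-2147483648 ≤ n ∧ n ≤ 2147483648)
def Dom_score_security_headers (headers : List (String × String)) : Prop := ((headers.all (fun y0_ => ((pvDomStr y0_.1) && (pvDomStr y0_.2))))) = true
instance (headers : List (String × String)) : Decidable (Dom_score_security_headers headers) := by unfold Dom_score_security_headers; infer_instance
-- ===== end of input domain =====

-- B replaces A's intermediate lowercased dict by six boolean flags maintained directly
-- in a single pass over the items (alternative decomposition, same cost).

-- ===== PORT A =====
def score_security_headers (headers : List (String × String)) : List (String × Bool) :=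
  let lower := headers.foldl (fun d kv => d.insert (PySem.Str.lower kv.1) kv.2)
    (PySem.Dict.empty : PySem.Dict String String)
  [("csp", lower.contains "content-security-policy"),
   ("x_content_type_options", PySem.Str.lower (lower.getD "x-content-type-options" "") == "nosniff"),
   ("x_frame_options", lower.contains "x-frame-options"),
   ("referrer_policy", lower.contains "referrer-policy"),
   ("permissions_policy", lower.contains "permissions-policy" || lower.contains "feature-policy"),
   ("hsts", lower.contains "strict-transport-security")]

-- ===== PORT B =====
-- state: (csp, x_content_type_options, x_frame_options, referrer_policy, permissions_policy, hsts)
def sshStep (s : Bool × Bool × Bool × Bool × Bool × Bool) (kv : String × String) :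
    Bool × Bool × Bool × Bool × Bool × Bool :=
  let lk := PySem.Str.lower kv.1
  if lk == "content-security-policy" then (true, s.2)
  else if lk == "x-content-type-options" then (s.1, PySem.Str.lower kv.2 == "nosniff", s.2.2)
  else if lk == "x-frame-options" then (s.1, s.2.1, true, s.2.2.2)
  else if lk == "referrer-policy" then (s.1, s.2.1, s.2.2.1, true, s.2.2.2.2)
  else if lk == "permissions-policy" || lk == "feature-policy" then
    (s.1, s.2.1, s.2.2.1, s.2.2.2.1, true, s.2.2.2.2.2)
  else if lk == "strict-transport-security" then
    (s.1, s.2.1, s.2.2.1, s.2.2.2.1, s.2.2.2.2.1, true)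
  else s

def score_security_headers_alt (headers : List (String × String)) : List (String × Bool) :=
  let s := headers.foldl sshStep (false, false, false, false, false, false)
  [("csp", s.1), ("x_content_type_options", s.2.1), ("x_frame_options", s.2.2.1),
   ("referrer_policy", s.2.2.2.1), ("permissions_policy", s.2.2.2.2.1), ("hsts", s.2.2.2.2.2)]

-- ===== PRECONDITION & SPEC =====
def Spec_score_security_headers (headers : List (String × String)) (out : List (String × Bool)) : Prop := out = score_security_headers_alt headers
instance (headers : List (String × String)) (out : List (String × Bool)) : Decidable (Spec_score_security_headers headers out) := by unfold Spec_score_security_headers; infer_instance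

-- ===== CLAIM (what is proved, stated in full; the proofs are below) =====
def Claim_equal_score_security_headers : Prop := ∀ (headers : List (String × String)), Dom_score_security_headers headers → Spec_score_security_headers headers (score_security_headers headers)

-- ===== LEMMAS AND PROOFS =====

/-- the six answer flags read off a (already lowercased-key) dict -/
def sshAns (d : PySem.Dict String String) : Bool × Bool × Bool × Bool × Bool × Bool :=
  (d.contains "content-security-policy",
   PySem.Str.lower (d.getD "x-content-type-options" "") == "nosniff",
   d.contains "x-frame-options",
   d.contains "referrer-policy",
   d.contains "permissions-policy" || d.contains "feature-policy",
   d.contains "strict-transport-security")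

lemma ssh_step_ans (d : PySem.Dict String String) (kv : String × String) :
    sshStep (sshAns d) kv = sshAns (d.insert (PySem.Str.lower kv.1) kv.2) := by
  by_cases h1 : PySem.Str.lower kv.1 = "content-security-policy" <;>
  by_cases h2 : PySem.Str.lower kv.1 = "x-content-type-options" <;>
  by_cases h3 : PySem.Str.lower kv.1 = "x-frame-options" <;>
  by_cases h4 : PySem.Str.lower kv.1 = "referrer-policy" <;>
  by_cases h5 : PySem.Str.lower kv.1 = "permissions-policy" <;>
  by_cases h6 : PySem.Str.lower kv.1 = "feature-policy" <;>
  by_cases h7 : PySem.Str.lower kv.1 = "strict-transport-security" <;>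
  simp_all [sshStep, sshAns, PySem.Dict.contains_insert, PySem.Dict.getD_insert]
  have e5 : ("permissions-policy" == PySem.Str.lower kv.1) = false :=
    beq_eq_false_iff_ne.mpr (Ne.symm h5)
  have e6 : ("feature-policy" == PySem.Str.lower kv.1) = false :=
    beq_eq_false_iff_ne.mpr (Ne.symm h6)
  simp [e5, e6, Ne.symm h1, Ne.symm h2, Ne.symm h3, Ne.symm h4, Ne.symm h7]

lemma ssh_fold (hs : List (String × String)) : ∀ (d : PySem.Dict String String),
    hs.foldl sshStep (sshAns d) =
      sshAns (hs.foldl (fun d kv => d.insert (PySem.Str.lower kv.1) kv.2) d) := by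
  induction hs with
  | nil => intro d; rfl
  | cons kv t ih => intro d; simp only [List.foldl_cons, ssh_step_ans, ih]

lemma ssh_ans_empty : sshAns (PySem.Dict.empty : PySem.Dict String String) =
    (false, false, false, false, false, false) := by decide

-- ===== VERDICT (by name: the statement is the Claim_ definition above) =====
theorem score_security_headers_spec : Claim_equal_score_security_headers := by
  intro headers _
  unfold Spec_score_security_headers score_security_headers score_security_headers_alt
  rw [← ssh_ans_empty, ssh_fold]
  rfl
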